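-- pv_equiv track=rewrite | github.com/simdutf/simdutf | scripts/sse_utf8_utf16_decode.py | buildshuf12_twobytes
-- ===== SOURCE A (Python) =====
-- def buildshuf12_twobytes(sizes):
--     answer = [0 for i in range(16)]
--     pos = 0
--     for i in range(len(sizes)):
--         if(sizes[i] == 1):
--             answer[2*i] = pos
--             answer[2*i+1] = 0xff
--             pos += 1
--         else:
--             answer[2*i] = pos + 1
--             answer[2*i+1] = pos
--             pos += 2
--     answer[15] = 0xF0 | sum(sizes)
--     return answer
-- ===== SOURCE B (Python) =====
-- def buildshuf12_twobytes(sizes):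
--     # precompute pair-widths and their prefix sums, then build the output by concatenation
--     widths = [1 if s == 1 else 2 for s in sizes]
--     prefix = [0]
--     for w in widths:
--         prefix.append(prefix[-1] + w)
--     pairs = []
--     for i in range(len(sizes)):
--         b = prefix[i]
--         pairs.extend((b, 0xFF) if widths[i] == 1 else (b + 1, b))
--     answer = pairs + [0] * (16 - len(pairs))
--     answer[15] = 0xF0 | sum(sizes)
--     return answer
-- ===== Notes on version B (the rewrite author's own statement) =====
-- stated objective: alternative
-- what changed: Replaces the accumulator-threaded single pass that writes into a preallocated 16-slot array with a precomputed width/prefix-sum table and an output list built by concatenating per-element pairs and zero padding.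
import Mathlib
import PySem

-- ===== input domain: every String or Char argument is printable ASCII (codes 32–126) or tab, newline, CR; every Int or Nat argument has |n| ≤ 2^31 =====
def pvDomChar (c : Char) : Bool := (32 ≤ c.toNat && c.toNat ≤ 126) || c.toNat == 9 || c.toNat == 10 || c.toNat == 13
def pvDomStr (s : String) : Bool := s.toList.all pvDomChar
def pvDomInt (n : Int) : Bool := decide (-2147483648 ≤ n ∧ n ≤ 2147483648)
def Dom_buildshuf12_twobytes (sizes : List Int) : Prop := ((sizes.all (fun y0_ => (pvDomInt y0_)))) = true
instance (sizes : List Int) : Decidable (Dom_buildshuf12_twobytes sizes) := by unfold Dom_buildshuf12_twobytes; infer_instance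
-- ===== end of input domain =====

-- B replaces A's accumulator-threaded in-place array writes with a precomputed prefix-sum
-- table and an output built by concatenation plus zero padding (objective: alternative
-- decomposition, same cost).

-- ===== PORT A =====
-- literal transliteration of A: foldl over range(len(sizes)) threading (answer, pos)
def buildshuf12_twobytes (sizes : List Int) : List Int :=
  let st := (List.range sizes.length).foldl
    (fun (st : List Int × Int) i =>
      if sizes.getD i 0 == 1 then
        (((st.1.set (2*i) st.2).set (2*i+1) 0xff), st.2 + 1)
      else
        (((st.1.set (2*i) (st.2+1)).set (2*i+1) st.2), st.2 + 2))
    (List.replicate 16 0, 0)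
  st.1.set 15 (PySem.Int.bor 0xF0 sizes.sum)

-- ===== PORT B =====
-- literal transliteration of Source B: widths, prefix table, pairs by concatenation, zero padding
def buildshuf12_twobytes_alt (sizes : List Int) : List Int :=
  let widths := sizes.map (fun s => if s == 1 then (1:Int) else 2)
  let pref := widths.foldl (fun p w => p ++ [p.getLastD 0 + w]) [0]
  let pairs := (List.range sizes.length).foldl
    (fun acc i =>
      let b := pref.getD i 0
      acc ++ (if widths.getD i 0 == 1 then [b, 0xff] else [b+1, b])) []
  let answer := pairs ++ List.replicate (16 - pairs.length) 0
  answer.set 15 (PySem.Int.bor 0xF0 sizes.sum)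

-- ===== PRECONDITION & SPEC =====
-- Pre_ excludes lists longer than 8, on which A raises IndexError (answer[2*i] with 2*i >= 16).
def Pre_buildshuf12_twobytes (sizes : List Int) : Prop := sizes.length ≤ 8
instance (sizes : List Int) : Decidable (Pre_buildshuf12_twobytes sizes) := by unfold Pre_buildshuf12_twobytes; infer_instance
def pvWitness_buildshuf12_twobytes : List Int := [1, 2, 2, 1]
def Spec_buildshuf12_twobytes (sizes : List Int) (out : List Int) : Prop := out = buildshuf12_twobytes_alt sizes
instance (sizes : List Int) (out : List Int) : Decidable (Spec_buildshuf12_twobytes sizes out) := by unfold Spec_buildshuf12_twobytes; infer_instance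

-- ===== CLAIM (what is proved, stated in full; the proofs are below) =====
def Claim_equal_buildshuf12_twobytes : Prop := ∀ (sizes : List Int), Dom_buildshuf12_twobytes sizes → Pre_buildshuf12_twobytes sizes → Spec_buildshuf12_twobytes sizes (buildshuf12_twobytes sizes)

-- ===== LEMMAS AND PROOFS =====

-- Both ports depend on the actual integers only through the booleans (sizes[i] == 1) and
-- through sum(sizes); the cores below capture the boolean part, which is a finite domain.

def coreA (bs : List Bool) : List Int :=
  ((List.range bs.length).foldl
    (fun (st : List Int × Int) i =>
      if bs.getD i false then
        (((st.1.set (2*i) st.2).set (2*i+1) 0xff), st.2 + 1)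
      else
        (((st.1.set (2*i) (st.2+1)).set (2*i+1) st.2), st.2 + 2))
    (List.replicate 16 0, 0)).1

def coreB (bs : List Bool) : List Int :=
  let widths := bs.map (fun b => if b then (1:Int) else 2)
  let pref := widths.foldl (fun p w => p ++ [p.getLastD 0 + w]) [0]
  let pairs := (List.range bs.length).foldl
    (fun acc i =>
      let b := pref.getD i 0
      acc ++ (if widths.getD i 0 == 1 then [b, 0xff] else [b+1, b])) []
  pairs ++ List.replicate (16 - pairs.length) 0

lemma getD_map_eq1 (sizes : List Int) (i : Nat) :
    ((sizes.map (fun s => s == 1)).getD i false) = (sizes.getD i 0 == 1) := by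
  simp [List.getD, List.getElem?_map]
  cases sizes[i]? <;> simp

lemma portA_core (sizes : List Int) :
    buildshuf12_twobytes sizes
      = (coreA (sizes.map (fun s => s == 1))).set 15 (PySem.Int.bor 0xF0 sizes.sum) := by
  unfold buildshuf12_twobytes coreA
  have h : (fun (st : List Int × Int) (i : Nat) =>
      if (sizes.map (fun s => s == 1)).getD i false then
        (((st.1.set (2*i) st.2).set (2*i+1) 0xff), st.2 + 1)
      else
        (((st.1.set (2*i) (st.2+1)).set (2*i+1) st.2), st.2 + 2))
      = (fun (st : List Int × Int) (i : Nat) =>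
      if sizes.getD i 0 == 1 then
        (((st.1.set (2*i) st.2).set (2*i+1) 0xff), st.2 + 1)
      else
        (((st.1.set (2*i) (st.2+1)).set (2*i+1) st.2), st.2 + 2)) := by
    funext st i
    rw [getD_map_eq1]
  simp only [List.length_map, h]

lemma widths_map (sizes : List Int) :
    sizes.map (fun s => if s == 1 then (1:Int) else 2)
      = (sizes.map (fun s => s == 1)).map (fun b => if b then (1:Int) else 2) := by
  rw [List.map_map]
  rfl

lemma portB_core (sizes : List Int) :
    buildshuf12_twobytes_alt sizes
      = (coreB (sizes.map (fun s => s == 1))).set 15 (PySem.Int.bor 0xF0 sizes.sum) := by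
  unfold buildshuf12_twobytes_alt coreB
  rw [widths_map]
  simp only [List.length_map]

-- enumeration of all boolean lists of length ≤ n
def enumB : Nat → List (List Bool)
  | 0 => [[]]
  | n+1 => [] :: (enumB n).flatMap (fun l => [true :: l, false :: l])

lemma mem_enumB : ∀ (n : Nat) (bs : List Bool), bs.length ≤ n → bs ∈ enumB n := by
  intro n
  induction n with
  | zero =>
    intro bs h
    cases bs with
    | nil => simp [enumB]
    | cons b t => simp at h
  | succ n ih =>
    intro bs h
    cases bs with
    | nil => simp [enumB]
    | cons b t =>
      simp only [enumB, List.mem_cons, List.mem_flatMap]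
      right
      refine ⟨t, ih t (by simpa using h), ?_⟩
      cases b <;> simp

set_option maxRecDepth 100000 in
set_option maxHeartbeats 1000000 in
lemma core_eq_of_mem : ∀ bs ∈ enumB 8, coreA bs = coreB bs := by decide

lemma core_eq (bs : List Bool) (h : bs.length ≤ 8) : coreA bs = coreB bs :=
  core_eq_of_mem bs (mem_enumB 8 bs h)

-- ===== VERDICT (by name: the statement is the Claim_ definition above) =====
theorem buildshuf12_twobytes_spec : Claim_equal_buildshuf12_twobytes := by
  unfold Claim_equal_buildshuf12_twobytes
  intro sizes _ hpre
  unfold Spec_buildshuf12_twobytes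
  unfold Pre_buildshuf12_twobytes at hpre
  rw [portA_core, portB_core, core_eq _ (by simpa using hpre)]
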